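-- pv_equiv track=rewrite | github.com/Lonercode/Python | strings/frequency_finder.py | get_frequency_order
-- ===== SOURCE A (Python) =====
-- import string
--
-- ETAOIN = "ETAOINSHRDLCUMWFGYPBVKJXQZ"
--
-- LETTERS = "ABCDEFGHIJKLMNOPQRSTUVWXYZ"
--
-- def get_letter_count(message: str) -> dict[str, int]:
--     """
--     returns the frequency of letters in the given string
--
--     >>> get_letter_count("This is a sentence")
--     {'A': 1, 'B': 0, 'C': 1, 'D': 0, 'E': 3, 'F': 0, 'G': 0, 'H': 1, 'I': 2, 'J': 0, 'K': 0, 'L': 0, 'M': 0, 'N': 2, 'O': 0, 'P': 0, 'Q': 0, 'R': 0, 'S': 3, 'T': 2, 'U': 0, 'V': 0, 'W': 0, 'X': 0, 'Y': 0, 'Z': 0}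
--
--     >>> get_letter_count("")
--     {'A': 0, 'B': 0, 'C': 0, 'D': 0, 'E': 0, 'F': 0, 'G': 0, 'H': 0, 'I': 0, 'J': 0, 'K': 0, 'L': 0, 'M': 0, 'N': 0, 'O': 0, 'P': 0, 'Q': 0, 'R': 0, 'S': 0, 'T': 0, 'U': 0, 'V': 0, 'W': 0, 'X': 0, 'Y': 0, 'Z': 0}
--     """
--     letter_count = {letter: 0 for letter in string.ascii_uppercase}
--     for letter in message.upper():
--         if letter in LETTERS:
--             letter_count[letter] += 1
--
--     return letter_count
--
-- def get_item_at_index_zero(x: tuple) -> str: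
--     """
--     return tuple item at index 0
--
--     >>> get_item_at_index_zero(('T','h','i','s' ))
--     'T'
--
--     >>> get_item_at_index_zero(('T','T','T','T' ))
--     'T'
--
--     >>> get_item_at_index_zero(('', ))
--     ''
--     """
--     return x[0]
--
-- def get_frequency_order(message: str) -> str:
--     """
--     Get the frequency order of the letters in the given string
--
--     >>> get_frequency_order('Hello World')
--     'LOWDRHEZQXJKVBPYGFMUCSNIAT'
--     >>> get_frequency_order('Hello@')
--     'LHOEZQXJKVBPYGFWMUCDRSNIAT'
--     >>> get_frequency_order('h')
--     'HZQXJKVBPYGFWMUCLDRSNIOATE'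
--     >>> get_frequency_order('')
--     'ZQXJKVBPYGFWMUCLDRHSNIOATE'
--     >>> get_frequency_order('123')
--     'ZQXJKVBPYGFWMUCLDRHSNIOATE'
--     """
--     letter_to_freq = get_letter_count(message)
--     freq_to_letter: dict[int, list[str]] = {
--         freq: [] for letter, freq in letter_to_freq.items()
--     }
--     for letter in LETTERS:
--         freq_to_letter[letter_to_freq[letter]].append(letter)
--
--     freq_to_letter_str: dict[int, str] = {}
--
--     for freq in freq_to_letter:
--         freq_to_letter[freq].sort(key=ETAOIN.find, reverse=True)
--         freq_to_letter_str[freq] = "".join(freq_to_letter[freq])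
--
--     freq_pairs = list(freq_to_letter_str.items())
--     freq_pairs.sort(key=get_item_at_index_zero, reverse=True)
--
--     freq_order: list[str] = [freq_pair[1] for freq_pair in freq_pairs]
--
--     return "".join(freq_order)
-- ===== SOURCE B (Python) =====
-- ETAOIN = "ETAOINSHRDLCUMWFGYPBVKJXQZ"
-- LETTERS = "ABCDEFGHIJKLMNOPQRSTUVWXYZ"
--
-- def get_frequency_order(message: str) -> str:
--     counts: dict[str, int] = {}
--     for ch in message.upper():
--         if ch in LETTERS:
--             counts[ch] = counts.get(ch, 0) + 1
--     return "".join(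
--         sorted(LETTERS, key=lambda c: (counts.get(c, 0), ETAOIN.find(c)), reverse=True)
--     )
-- ===== Notes on version B (the rewrite author's own statement) =====
-- stated objective: simpler
-- what changed: Replaces A's frequency-to-letter-bucket dicts (build buckets, sort each bucket by ETAOIN rank, then sort the buckets by frequency) with a single composite-key sort of the 26 letters by (count, ETAOIN.find) descending.
import Mathlib
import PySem

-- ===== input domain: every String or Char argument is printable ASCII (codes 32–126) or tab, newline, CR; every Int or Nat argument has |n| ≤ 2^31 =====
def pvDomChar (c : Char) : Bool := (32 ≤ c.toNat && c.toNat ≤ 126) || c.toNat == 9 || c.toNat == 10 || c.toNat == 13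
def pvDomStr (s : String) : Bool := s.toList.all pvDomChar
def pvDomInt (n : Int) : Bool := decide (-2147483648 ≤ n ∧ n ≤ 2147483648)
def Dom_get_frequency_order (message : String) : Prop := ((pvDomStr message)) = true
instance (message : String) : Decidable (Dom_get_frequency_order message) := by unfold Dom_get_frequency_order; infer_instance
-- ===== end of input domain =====

-- B replaces A's frequency-bucket dicts and two-level sort by a single composite-key
-- sort of the 26 letters (objective: simpler); same return value for every string.

-- module constants ETAOIN and LETTERS
def pvETAOIN : List Char := "ETAOINSHRDLCUMWFGYPBVKJXQZ".toList
def pvLETTERS : List Char := "ABCDEFGHIJKLMNOPQRSTUVWXYZ".toList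

-- ===== PORT A =====
-- helper get_letter_count: {letter: 0 for letter in ascii_uppercase}, then the counting loop
def get_letter_count (message : String) : PySem.Dict Char Int :=
  let letter_count := pvLETTERS.foldl (fun d c => d.insert c 0) PySem.Dict.empty
  (PySem.Chars.upper message.toList).foldl
    (fun d c => if PySem.Chars.isIn [c] pvLETTERS then d.modify c 0 (· + 1) else d)
    letter_count

-- helper get_item_at_index_zero: x[0] (used as sort key on the (freq, str) pairs)
def get_item_at_index_zero (x : Int × List Char) : Int := x.1

-- the three local dicts of A, as named helpers (one per Python local):
-- freq_to_letter = {freq: [] for letter, freq in letter_to_freq.items()}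
def pvA_freq_to_letter0 (lf : PySem.Dict Char Int) : PySem.Dict Int (List Char) :=
  lf.items.foldl (fun d p => d.insert p.2 []) PySem.Dict.empty
-- for letter in LETTERS: freq_to_letter[letter_to_freq[letter]].append(letter)
-- (letter_to_freq[letter] is always present; ported as getD, exact here)
def pvA_freq_to_letter (lf : PySem.Dict Char Int) : PySem.Dict Int (List Char) :=
  pvLETTERS.foldl (fun d c => d.modify (lf.getD c 0) [] (fun l => l ++ [c]))
    (pvA_freq_to_letter0 lf)
-- for freq in freq_to_letter: sort the bucket by ETAOIN.find desc and join it
-- (a Python str is a List Char here, so "".join of one-char strings is the list itself)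
def pvA_freq_to_letter_str (lf : PySem.Dict Char Int) : PySem.Dict Int (List Char) :=
  (pvA_freq_to_letter lf).items.foldl
    (fun d p => d.insert p.1
      (PySem.List.sorted p.2 (fun c => PySem.Chars.find pvETAOIN [c]) true))
    PySem.Dict.empty

def get_frequency_order (message : String) : String :=
  let letter_to_freq := get_letter_count message
  -- freq_pairs = sorted(freq_to_letter_str.items(), key=get_item_at_index_zero, reverse=True)
  let freq_pairs := PySem.List.sorted (pvA_freq_to_letter_str letter_to_freq).items
    get_item_at_index_zero true
  let freq_order := freq_pairs.map (fun p => p.2)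
  String.ofList (PySem.Chars.join [] freq_order)

-- ===== PORT B =====
-- counts = {}; for ch in message.upper(): if ch in LETTERS: counts[ch] = counts.get(ch, 0) + 1
def pvB_counts (message : String) : PySem.Dict Char Int :=
  (PySem.Chars.upper message.toList).foldl
    (fun d c => if PySem.Chars.isIn [c] pvLETTERS then d.insert c (d.getD c 0 + 1) else d)
    PySem.Dict.empty

def get_frequency_order_alt (message : String) : String :=
  -- "".join(sorted(LETTERS, key=lambda c: (counts.get(c, 0), ETAOIN.find(c)), reverse=True))
  String.ofList (PySem.List.sorted2 pvLETTERS
    (fun c => (pvB_counts message).getD c 0) (fun c => PySem.Chars.find pvETAOIN [c]) true)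

-- ===== PRECONDITION & SPEC =====
def Spec_get_frequency_order (message : String) (out : String) : Prop := out = get_frequency_order_alt message
instance (message : String) (out : String) : Decidable (Spec_get_frequency_order message out) := by unfold Spec_get_frequency_order; infer_instance

-- ===== CLAIM (what is proved, stated in full; the proofs are below) =====
def Claim_equal_get_frequency_order : Prop := ∀ (message : String), Dom_get_frequency_order message → Spec_get_frequency_order message (get_frequency_order message)

-- ===== LEMMAS AND PROOFS =====

-- abbreviations used only by the proofs
def pvFind (c : Char) : Int := PySem.Chars.find pvETAOIN [c]
def pvKey (f : Char → Int) (c : Char) : Int := 28 * f c + pvFind c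
def pvBucket (f : Char → Int) (v : Int) : List Char := pvLETTERS.filter (fun c => f c == v)
def pvS (f : Char → Int) (v : Int) : List Char := PySem.List.sorted (pvBucket f v) pvFind true
def pvK (f : Char → Int) : List Int := PySem.Set.ofList (pvLETTERS.map f)
def pvAout (f : Char → Int) : List Char :=
  ((PySem.List.sorted ((pvK f).map (fun v => (v, pvS f v))) (fun p => p.1) true).map
    (fun p => p.2)).flatten
def pvInit : PySem.Dict Char Int := pvLETTERS.foldl (fun d c => d.insert c 0) PySem.Dict.empty

-- bounds for the ETAOIN rank
lemma pvFind_bounds (c : Char) : -1 ≤ pvFind c ∧ pvFind c ≤ 26 := by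
  constructor
  · exact PySem.Chars.neg_one_le_find _ _
  · exact PySem.Chars.find_le_length pvETAOIN [c]

lemma pvFind_ne : pvLETTERS.Pairwise (fun a b => pvFind a ≠ pvFind b) := by
  rw [← List.pairwise_map (f := pvFind)]
  have h : (pvLETTERS.map pvFind).Nodup := by decide
  exact h

lemma pvLETTERS_nodup : pvLETTERS.Nodup := by decide

-- the guarded counting loop of A (dict pre-seeded, +=)
lemma getD_guard_modify (l : List Char) (d : PySem.Dict Char Int) (v : Char) :
    (l.foldl (fun d c => if PySem.Chars.isIn [c] pvLETTERS then d.modify c 0 (· + 1) else d) d).getD v 0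
      = d.getD v 0 + (if PySem.Chars.isIn [v] pvLETTERS then (l.count v : Int) else 0) := by
  induction l generalizing d with
  | nil => simp
  | cons c t ih =>
    simp only [List.foldl_cons, ih]
    by_cases hc : PySem.Chars.isIn [c] pvLETTERS = true
    · simp only [hc, if_true, PySem.Dict.getD_modify]
      by_cases hv : v = c
      · subst hv; simp [hc, List.count_cons]; ring
      · simp [hv, Ne.symm hv]
    · simp only [Bool.not_eq_true] at hc
      simp only [hc, Bool.false_eq_true, if_false]
      by_cases hv : v = c
      · subst hv; simp [hc]
      · simp [Ne.symm hv]

-- the guarded counting loop of B (get-default, insert)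
lemma getD_guard_insert (l : List Char) (d : PySem.Dict Char Int) (v : Char) :
    (l.foldl (fun d c => if PySem.Chars.isIn [c] pvLETTERS then d.insert c (d.getD c 0 + 1) else d) d).getD v 0
      = d.getD v 0 + (if PySem.Chars.isIn [v] pvLETTERS then (l.count v : Int) else 0) := by
  induction l generalizing d with
  | nil => simp
  | cons c t ih =>
    simp only [List.foldl_cons, ih]
    by_cases hc : PySem.Chars.isIn [c] pvLETTERS = true
    · simp only [hc, if_true, PySem.Dict.getD_insert]
      by_cases hv : v = c
      · subst hv; simp [hc, List.count_cons]; ring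
      · simp [hv, Ne.symm hv]
    · simp only [Bool.not_eq_true] at hc
      simp only [hc, Bool.false_eq_true, if_false]
      by_cases hv : v = c
      · subst hv; simp [hc]
      · simp [Ne.symm hv]

-- keys are untouched by A's guarded loop
lemma keys_guard_modify (l : List Char) (d : PySem.Dict Char Int)
    (h : ∀ c, PySem.Chars.isIn [c] pvLETTERS = true → d.contains c = true) :
    (l.foldl (fun d c => if PySem.Chars.isIn [c] pvLETTERS then d.modify c 0 (· + 1) else d) d).keys
      = d.keys := by
  induction l generalizing d with
  | nil => rfl
  | cons c t ih =>
    simp only [List.foldl_cons]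
    by_cases hc : PySem.Chars.isIn [c] pvLETTERS = true
    · simp only [hc]
      rw [if_pos trivial]
      rw [ih _ (fun c' hc' => by rw [PySem.Dict.contains_modify]; simp [h c' hc'])]
      rw [PySem.Dict.keys_modify, PySem.Dict.keys_insert_of_contains _ _ (h c hc)]
    · simp only [Bool.not_eq_true] at hc
      simp only [hc, Bool.false_eq_true, if_false]
      exact ih d h

-- the seed dict {letter: 0}
lemma contains_seed (l : List Char) (d : PySem.Dict Char Int) (c : Char) :
    (l.foldl (fun d c => d.insert c 0) d).contains c = (decide (c ∈ l) || d.contains c) := by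
  induction l generalizing d with
  | nil => simp
  | cons a t ih =>
    simp only [List.foldl_cons, ih, PySem.Dict.contains_insert]
    by_cases h : c = a
    · subst h; simp
    · by_cases h2 : c ∈ t <;> simp [h, h2]

lemma getD_seed (l : List Char) (d : PySem.Dict Char Int) (c : Char) :
    (l.foldl (fun d c => d.insert c 0) d).getD c 0 = if c ∈ l then 0 else d.getD c 0 := by
  induction l generalizing d with
  | nil => simp
  | cons a t ih =>
    simp only [List.foldl_cons, ih, PySem.Dict.getD_insert]
    by_cases h : c ∈ t
    · simp [h]
    · by_cases h2 : c = a <;> simp [h, h2]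

lemma keys_seed : pvInit.keys = pvLETTERS := by
  unfold pvInit
  have h := PySem.Dict.keys_foldl_insert pvLETTERS (fun _ _ => (0 : Int)) PySem.Dict.empty
  simp only [] at h
  rw [h, PySem.Dict.keys_empty, PySem.Set.update_nil_left]
  exact PySem.Set.ofList_eq_self_of_nodup pvLETTERS pvLETTERS_nodup

-- a fold inserting only [] keeps every getD at []
lemma getD_const_insert (l : List (Char × Int)) (d : PySem.Dict Int (List Char))
    (h : ∀ w, d.getD w ([] : List Char) = []) (v : Int) :
    (l.foldl (fun d p => d.insert p.2 ([] : List Char)) d).getD v [] = [] := by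
  induction l generalizing d with
  | nil => exact h v
  | cons p t ih =>
    simp only [List.foldl_cons]
    exact ih _ (fun w => by rw [PySem.Dict.getD_insert]; split <;> simp [h])

-- Set.update adds nothing when everything is already present
lemma set_update_subset (s : PySem.Set Int) (l : List Int) (h : ∀ x ∈ l, x ∈ s) :
    PySem.Set.update s l = s := by
  induction l generalizing s with
  | nil => rfl
  | cons x t ih =>
    rw [PySem.Set.update_cons, PySem.Set.add_of_mem (h x (by simp))]
    exact ih s (fun y hy => h y (by simp [hy]))

-- A's grouping loop: getD of the grouped dict is the filter bucket
lemma getD_groupfold (f : Char → Int) (l : List Char) (d : PySem.Dict Int (List Char)) (v : Int) :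
    (l.foldl (fun d c => d.modify (f c) [] (fun l => l ++ [c])) d).getD v []
      = d.getD v [] ++ l.filter (fun c => f c == v) := by
  have hmap : (l.foldl (fun d c => d.modify (f c) [] (fun l => l ++ [c])) d)
      = ((l.map (fun c => (f c, c))).foldl
          (fun (d : PySem.Dict Int (List Char)) p => d.modify p.1 [] (fun l => l ++ [p.2])) d) := by
    rw [List.foldl_map]
  rw [hmap, PySem.Dict.getD_foldl_modify_append]
  congr 1
  rw [List.filter_map]
  simp [Function.comp_def]

-- sorted2 with the lexicographic (count, find) key is sorted with the packed key
lemma sorted2_eq_sorted_key (xs : List Char) (f : Char → Int) :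
    PySem.List.sorted2 xs f (fun c => PySem.Chars.find pvETAOIN [c]) true
      = PySem.List.sorted xs (pvKey f) true := by
  have hb : (fun (a b : Char) =>
        decide (f b < f a) || (!decide (f a < f b)
          && decide (PySem.Chars.find pvETAOIN [b] < PySem.Chars.find pvETAOIN [a])))
      = (fun a b => decide (pvKey f b < pvKey f a)) := by
    funext a b
    have ha := pvFind_bounds a
    have hb' := pvFind_bounds b
    simp only [pvFind] at ha hb'
    rw [Bool.eq_iff_iff]
    simp only [Bool.or_eq_true, Bool.and_eq_true, Bool.not_eq_true', decide_eq_true_iff,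
      decide_eq_false_iff_not]
    unfold pvKey pvFind
    omega
  show xs.foldl (fun acc x => PySem.List.insertBy
      (fun a b => decide (f b < f a) || (!decide (f a < f b)
        && decide (PySem.Chars.find pvETAOIN [b] < PySem.Chars.find pvETAOIN [a])))
      x acc) []
    = xs.foldl (fun acc x => PySem.List.insertBy
      (fun a b => decide (pvKey f b < pvKey f a)) x acc) []
  rw [hb]

-- packed keys are pairwise distinct on the 26 letters, whatever the counts are
lemma pvKey_pairwise_ne (g : Char → Int) :
    pvLETTERS.Pairwise (fun a b => pvKey g a ≠ pvKey g b) := by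
  refine pvFind_ne.imp ?_
  intro a b hne heq
  have ha := pvFind_bounds a
  have hb := pvFind_bounds b
  unfold pvKey at heq
  omega

-- two packed-key sorts with keys agreeing on the letters coincide
lemma sorted_key_congr (f g : Char → Int) (h : ∀ c ∈ pvLETTERS, f c = g c) :
    PySem.List.sorted pvLETTERS (pvKey f) true = PySem.List.sorted pvLETTERS (pvKey g) true := by
  apply PySem.List.sorted_rev_eq_of_perm_of_pairwise_gt
  · exact PySem.List.sorted_perm _ _ _
  · have h1 := PySem.List.sorted_pairwise_rev pvLETTERS (pvKey g)
    have hperm := PySem.List.sorted_perm pvLETTERS (pvKey g) true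
    have hne : (PySem.List.sorted pvLETTERS (pvKey g) true).Pairwise
        (fun a b => pvKey g a ≠ pvKey g b) := by
      rw [List.Perm.pairwise_iff (fun hxy => fun e => hxy e.symm) hperm]
      exact pvKey_pairwise_ne g
    refine (h1.and hne).imp_of_mem ?_
    intro a b ha hb hab
    have ha' := (PySem.List.mem_sorted pvLETTERS (pvKey g) true a).1 ha
    have hb' := (PySem.List.mem_sorted pvLETTERS (pvKey g) true b).1 hb
    have hlt : pvKey g b < pvKey g a := lt_of_le_of_ne hab.1 (fun e => hab.2 e.symm)
    unfold pvKey
    rw [h a ha', h b hb']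
    unfold pvKey at hlt
    exact hlt

-- members of a bucket: letters whose count is the bucket's frequency
lemma mem_pvS (f : Char → Int) (v : Int) (c : Char) :
    c ∈ pvS f v ↔ c ∈ pvLETTERS ∧ f c = v := by
  unfold pvS pvBucket
  rw [PySem.List.mem_sorted, List.mem_filter]
  simp

-- inside one bucket the output is strictly descending in the packed key
lemma pvS_pairwise (f : Char → Int) (v : Int) :
    (pvS f v).Pairwise (fun a b => pvKey f b < pvKey f a) := by
  have h1 := PySem.List.sorted_pairwise_rev (pvBucket f v) pvFind
  have hperm := PySem.List.sorted_perm (pvBucket f v) pvFind true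
  have hne : (pvS f v).Pairwise (fun a b => pvFind a ≠ pvFind b) := by
    unfold pvS
    rw [List.Perm.pairwise_iff (fun hxy => fun e => hxy e.symm) hperm]
    exact pvFind_ne.sublist List.filter_sublist
  refine ((h1.and hne).imp_of_mem ?_)
  intro a b ha hb hab
  have ha' := (mem_pvS f v a).1 ha
  have hb' := (mem_pvS f v b).1 hb
  have : pvFind b < pvFind a := lt_of_le_of_ne hab.1 (fun e => hab.2 e.symm)
  unfold pvKey
  omega

-- the heart: A's bucket construction is one packed-key sort
set_option maxHeartbeats 800000 in
lemma pvAout_eq_sorted (f : Char → Int) :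
    pvAout f = PySem.List.sorted pvLETTERS (pvKey f) true := by
  have hKnd : (pvK f).Nodup := PySem.Set.nodup_ofList _
  have hPK := PySem.List.sorted_perm ((pvK f).map (fun v => (v, pvS f v))) (fun p => p.1) true
  -- every member of the sorted pair list is (v, pvS f v) with v ∈ pvK f
  have hmemP : ∀ p ∈ PySem.List.sorted ((pvK f).map (fun v => (v, pvS f v))) (fun p => p.1) true,
      p.1 ∈ pvK f ∧ p.2 = pvS f p.1 := by
    intro p hp
    have := (PySem.List.mem_sorted _ _ _ _).1 hp
    rcases List.mem_map.1 this with ⟨v, hv, rfl⟩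
    exact ⟨hv, rfl⟩
  -- the pair list is strictly descending in its first component
  have hfst : (PySem.List.sorted ((pvK f).map (fun v => (v, pvS f v))) (fun p => p.1) true).Pairwise
      (fun p q => q.1 < p.1) := by
    have h1 := PySem.List.sorted_pairwise_rev ((pvK f).map (fun v => (v, pvS f v))) (fun p => p.1)
    have hnd : ((PySem.List.sorted ((pvK f).map (fun v => (v, pvS f v))) (fun p => p.1) true).map
        (fun p => p.1)).Nodup := by
      rw [(hPK.map (fun p => p.1)).nodup_iff]
      simp only [List.map_map]
      simpa [Function.comp_def] using hKnd
    have hne := List.pairwise_map.1 hnd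
    refine ((h1.and hne).imp ?_)
    intro p q hpq
    exact lt_of_le_of_ne hpq.1 (fun e => hpq.2 e.symm)
  -- strict pairwise descent of the flattened output
  have hpair : (pvAout f).Pairwise (fun a b => pvKey f b < pvKey f a) := by
    unfold pvAout
    rw [List.pairwise_flatten]
    constructor
    · intro l hl
      rcases List.mem_map.1 hl with ⟨p, hp, rfl⟩
      rcases hmemP p hp with ⟨-, h2⟩
      rw [h2]
      exact pvS_pairwise f p.1
    · rw [List.pairwise_map]
      refine hfst.imp_of_mem ?_
      intro p q hp hq hlt x hx y hy
      rcases hmemP p hp with ⟨-, hp2⟩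
      rcases hmemP q hq with ⟨-, hq2⟩
      rw [hp2] at hx
      rw [hq2] at hy
      have hx' := (mem_pvS f p.1 x).1 hx
      have hy' := (mem_pvS f q.1 y).1 hy
      have hbx := pvFind_bounds x
      have hby := pvFind_bounds y
      unfold pvKey
      omega
  symm
  apply PySem.List.sorted_rev_eq_of_perm_of_pairwise_gt
  · -- permutation with the letters: both are duplicate-free with the same members
    have hnd : (pvAout f).Nodup :=
      hpair.imp (fun {a b} hlt e => by subst e; exact lt_irrefl _ hlt)
    rw [List.perm_ext_iff_of_nodup hnd pvLETTERS_nodup]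
    intro c
    unfold pvAout
    rw [List.mem_flatten]
    constructor
    · rintro ⟨l, hl, hc⟩
      rcases List.mem_map.1 hl with ⟨p, hp, rfl⟩
      rcases hmemP p hp with ⟨-, hp2⟩
      rw [hp2] at hc
      exact ((mem_pvS f p.1 c).1 hc).1
    · intro hc
      refine ⟨pvS f (f c), List.mem_map.2 ⟨(f c, pvS f (f c)), ?_, rfl⟩, ?_⟩
      · rw [hPK.mem_iff]
        exact List.mem_map.2 ⟨f c, (PySem.Set.mem_ofList _ _).2 (List.mem_map.2 ⟨c, hc, rfl⟩), rfl⟩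
      · exact (mem_pvS f (f c) c).2 ⟨hc, rfl⟩
  · exact hpair

-- A's count dict: lookups and keys
lemma getD_get_letter_count (message : String) (c : Char) :
    (get_letter_count message).getD c 0
      = pvInit.getD c 0
        + (if PySem.Chars.isIn [c] pvLETTERS then ((PySem.Chars.upper message.toList).count c : Int) else 0) := by
  unfold get_letter_count pvInit
  exact getD_guard_modify _ _ _

lemma keys_get_letter_count (message : String) :
    (get_letter_count message).keys = pvLETTERS := by
  unfold get_letter_count
  rw [keys_guard_modify]
  · exact keys_seed
  · intro c hc
    have hmem : c ∈ pvLETTERS := by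
      have := (PySem.Chars.isIn_iff_infix [c] pvLETTERS).1 hc
      exact List.singleton_sublist.1 this.sublist
    show pvInit.contains c = true
    unfold pvInit
    rw [contains_seed]
    simp [hmem]

lemma items_get_letter_count (message : String) :
    (get_letter_count message).items
      = pvLETTERS.map (fun c => (c, (get_letter_count message).getD c 0)) := by
  rw [PySem.Dict.items_eq_map_keys _ (by rw [keys_get_letter_count]; exact pvLETTERS_nodup) 0,
    keys_get_letter_count]

-- stage 1: the {freq: []} dict
lemma freq0_getD (message : String) (v : Int) :
    (pvA_freq_to_letter0 (get_letter_count message)).getD v [] = [] := by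
  unfold pvA_freq_to_letter0
  exact getD_const_insert _ _ (fun w => by simp) v

lemma freq0_keys (message : String) :
    (pvA_freq_to_letter0 (get_letter_count message)).keys
      = pvK (fun c => (get_letter_count message).getD c 0) := by
  unfold pvA_freq_to_letter0
  have h := PySem.Dict.keys_foldl_insert_key (get_letter_count message).items
    (fun p => p.2) (fun _ _ => ([] : List Char)) PySem.Dict.empty
  simp only [] at h
  rw [h, PySem.Dict.keys_empty, PySem.Set.update_nil_left, items_get_letter_count,
    List.map_map]
  unfold pvK
  congr 1

-- stage 2: buckets filled letter by letter
lemma freq1_getD (message : String) (v : Int) :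
    (pvA_freq_to_letter (get_letter_count message)).getD v []
      = pvBucket (fun c => (get_letter_count message).getD c 0) v := by
  unfold pvA_freq_to_letter
  rw [getD_groupfold, freq0_getD]
  rfl

lemma freq1_keys (message : String) :
    (pvA_freq_to_letter (get_letter_count message)).keys
      = pvK (fun c => (get_letter_count message).getD c 0) := by
  unfold pvA_freq_to_letter
  have h := PySem.Dict.keys_foldl_modify_key pvLETTERS
    (fun c => (get_letter_count message).getD c 0) ([] : List Char)
    (fun _ c => fun l => l ++ [c]) (pvA_freq_to_letter0 (get_letter_count message))
  simp only [] at h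
  rw [h, freq0_keys]
  apply set_update_subset
  intro x hx
  exact (PySem.Set.mem_ofList _ _).2 hx

lemma freq1_items (message : String) :
    (pvA_freq_to_letter (get_letter_count message)).items
      = (pvK (fun c => (get_letter_count message).getD c 0)).map
          (fun v => (v, pvBucket (fun c => (get_letter_count message).getD c 0) v)) := by
  rw [PySem.Dict.items_eq_map_keys _
      (by rw [freq1_keys]; exact PySem.Set.nodup_ofList _) [], freq1_keys]
  exact List.map_congr_left (fun v _ => by rw [freq1_getD])

-- stage 3: buckets sorted by ETAOIN rank
lemma str_items (message : String) :
    (pvA_freq_to_letter_str (get_letter_count message)).items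
      = (pvK (fun c => (get_letter_count message).getD c 0)).map
          (fun v => (v, pvS (fun c => (get_letter_count message).getD c 0) v)) := by
  unfold pvA_freq_to_letter_str
  rw [freq1_items]
  have h := PySem.Dict.items_foldl_insert_fresh
    ((pvK (fun c => (get_letter_count message).getD c 0)).map
      (fun v => (v, pvBucket (fun c => (get_letter_count message).getD c 0) v)))
    (fun p => p.1)
    (fun p => PySem.List.sorted p.2 (fun c => PySem.Chars.find pvETAOIN [c]) true)
    PySem.Dict.empty
    (fun a _ => PySem.Dict.contains_empty _)
    (by simpa [List.map_map, Function.comp_def] using PySem.Set.nodup_ofList (pvLETTERS.map _))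
  simp only [] at h
  rw [h]
  have hie : (PySem.Dict.empty : PySem.Dict Int (List Char)).items = [] := rfl
  rw [hie, List.nil_append, List.map_map]
  apply List.map_congr_left
  intro v _
  rfl

-- "".join over a list of strings is flatten
lemma join_nil_flatten (l : List (List Char)) : PySem.Chars.join [] l = l.flatten := by
  simp only [PySem.Chars.join]
  induction l with
  | nil => rfl
  | cons a t ih =>
    cases t with
    | nil => simp [List.intercalate]
    | cons b u =>
      simp only [List.intercalate, List.intersperse] at ih ⊢
      simp_all

-- A's port computes pvAout of its count function
lemma get_frequency_order_eq (message : String) :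
    get_frequency_order message
      = String.ofList (pvAout (fun c => (get_letter_count message).getD c 0)) := by
  show String.ofList (PySem.Chars.join []
      ((PySem.List.sorted (pvA_freq_to_letter_str (get_letter_count message)).items
        get_item_at_index_zero true).map (fun p => p.2))) = _
  rw [str_items,
    show get_item_at_index_zero = (fun p : Int × List Char => p.1) from rfl,
    join_nil_flatten]
  rfl

-- B's count dict: lookups
lemma getD_pvB_counts (message : String) (c : Char) :
    (pvB_counts message).getD c 0
      = (if PySem.Chars.isIn [c] pvLETTERS then ((PySem.Chars.upper message.toList).count c : Int) else 0) := by
  unfold pvB_counts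
  rw [getD_guard_insert]
  simp

-- B's port computes the packed-key sort of its count function
lemma get_frequency_order_alt_eq (message : String) :
    get_frequency_order_alt message
      = String.ofList (PySem.List.sorted pvLETTERS
          (pvKey (fun c => (pvB_counts message).getD c 0)) true) := by
  unfold get_frequency_order_alt
  rw [sorted2_eq_sorted_key]

-- ===== VERDICT (by name: the statement is the Claim_ definition above) =====
set_option maxHeartbeats 800000 in
theorem get_frequency_order_spec : Claim_equal_get_frequency_order := by
  intro message _
  unfold Spec_get_frequency_order
  rw [get_frequency_order_eq, get_frequency_order_alt_eq, pvAout_eq_sorted]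
  refine congrArg String.ofList ?_
  apply sorted_key_congr
  intro c hc
  rw [getD_get_letter_count, getD_pvB_counts]
  have h0 : pvInit.getD c 0 = 0 := by
    unfold pvInit
    rw [getD_seed]
    simp [hc]
  simp [h0]
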